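-- pv_equiv track=rewrite | github.com/Terrydaktal/wordscrape | telegram/wiktionary_define_and_collapse.py | _strip_templates
-- ===== SOURCE A (Python) =====
-- def _strip_templates(text):
--     result = []
--     depth = 0
--     idx = 0
--     while idx < len(text):
--         if text.startswith("{{", idx):
--             depth += 1
--             idx += 2
--             continue
--         if depth and text.startswith("}}", idx):
--             depth -= 1
--             idx += 2
--             continue
--         if depth == 0:
--             result.append(text[idx])
--         idx += 1
--     return "".join(result)
-- ===== SOURCE B (Python) =====
-- import re
--
-- def _strip_templates(text):
--     out = []
--     depth = 0
--     pos = 0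
--     for m in re.finditer(r'\{\{|\}\}', text):
--         if depth == 0:
--             out.append(text[pos:m.start()])
--         if m.group() == '{{':
--             depth += 1
--         elif depth:
--             depth -= 1
--         else:
--             out.append('}}')
--         pos = m.end()
--     if depth == 0:
--         out.append(text[pos:])
--     return ''.join(out)
-- ===== Notes on version B (the rewrite author's own statement) =====
-- stated objective: faster
-- what changed: Replaces A's char-by-char Python cursor with startswith tests at every index by a regex tokenisation (re.finditer of '{{'/'}}') followed by one walk over the alternating segment/token list with a depth counter, emitting whole segments at depth 0.
import Mathlib
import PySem

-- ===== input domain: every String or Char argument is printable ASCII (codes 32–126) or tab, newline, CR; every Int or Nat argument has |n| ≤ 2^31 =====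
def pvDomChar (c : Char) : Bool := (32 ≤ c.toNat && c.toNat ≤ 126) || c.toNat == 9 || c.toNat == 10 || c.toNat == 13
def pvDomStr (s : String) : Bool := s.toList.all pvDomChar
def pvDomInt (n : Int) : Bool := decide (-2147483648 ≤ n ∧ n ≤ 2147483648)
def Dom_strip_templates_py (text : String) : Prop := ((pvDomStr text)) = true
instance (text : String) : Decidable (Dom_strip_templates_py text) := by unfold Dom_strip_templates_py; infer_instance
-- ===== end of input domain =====

-- B tokenises the '{{'/'}}' brace tokens first (re.finditer) and walks the alternating
-- (segment, token) list with a depth counter, instead of A's char-by-char cursor with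
-- startswith tests; objective: a more idiomatic decomposition, same exact output.

-- ===== PORT A =====
-- A's while loop: the cursor idx becomes consumption of the head of the char list;
-- 'text.startswith("{{", idx)' / '"}}"' are the two-head patterns, branches in A's order.
def pvGoA (depth : Nat) (cs : List Char) : List Char :=
  match cs with
  | [] => []
  | '{' :: '{' :: rest => pvGoA (depth + 1) rest
  | '}' :: '}' :: rest =>
      if depth > 0 then pvGoA (depth - 1) rest
      else '}' :: pvGoA depth ('}' :: rest)   -- depth == 0: append text[idx], idx += 1
  | c :: rest => (if depth = 0 then [c] else []) ++ pvGoA depth rest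
termination_by cs.length
decreasing_by all_goals simp

def strip_templates_py (text : String) : String := String.ofList (pvGoA 0 text.toList)

-- ===== PORT B =====
-- re.finditer(r'\{\{|\}\}', text): the left-to-right non-overlapping scan, producing the
-- list of (segment-before-token, token) pairs plus the trailing segment; token true = '{{'.
def pvTokens (cs : List Char) : List (List Char × Bool) × List Char :=
  match cs with
  | [] => ([], [])
  | '{' :: '{' :: rest =>
      let p := pvTokens rest
      (([], true) :: p.1, p.2)
  | '}' :: '}' :: rest =>
      let p := pvTokens rest
      (([], false) :: p.1, p.2)
  | c :: rest =>
      let p := pvTokens rest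
      match p.1 with
      | (seg, b) :: ts => ((c :: seg, b) :: ts, p.2)
      | [] => ([], c :: p.2)
termination_by cs.length
decreasing_by all_goals simp

-- B's for-loop over the matches, with the trailing-segment append after the loop
def pvGoB (depth : Nat) : List (List Char × Bool) → List Char → List Char
  | [], tail => if depth = 0 then tail else []
  | (seg, tok) :: ts, tail =>
      (if depth = 0 then seg else []) ++
      (if tok then pvGoB (depth + 1) ts tail
       else if depth > 0 then pvGoB (depth - 1) ts tail
       else '}' :: '}' :: pvGoB depth ts tail)

def strip_templates_py_alt (text : String) : String :=
  String.ofList (pvGoB 0 (pvTokens text.toList).1 (pvTokens text.toList).2)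

-- ===== PRECONDITION & SPEC =====
def Spec_strip_templates_py (text : String) (out : String) : Prop := out = strip_templates_py_alt text
instance (text : String) (out : String) : Decidable (Spec_strip_templates_py text out) := by unfold Spec_strip_templates_py; infer_instance

-- ===== CLAIM (what is proved, stated in full; the proofs are below) =====
def Claim_equal_strip_templates_py : Prop := ∀ (text : String), Dom_strip_templates_py text → Spec_strip_templates_py text (strip_templates_py text)

-- ===== LEMMAS AND PROOFS =====

-- pvTokens on a head character that does not start a brace token: prepend it to the
-- first segment (or to the tail when there is no later token).
theorem pvTokens_cons (c : Char) (rest : List Char)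
    (h1 : ∀ r, c = '{' → rest = '{' :: r → False)
    (h2 : ∀ r, c = '}' → rest = '}' :: r → False) :
    pvTokens (c :: rest) = (match (pvTokens rest).1 with
      | (seg, b) :: ts => ((c :: seg, b) :: ts, (pvTokens rest).2)
      | [] => ([], c :: (pvTokens rest).2)) := by
  rw [pvTokens.eq_def]
  split
  · simp_all
  · rename_i heq
    simp only [List.cons.injEq] at heq
    exact absurd heq.2 (fun h => h1 _ heq.1 h)
  · rename_i heq
    simp only [List.cons.injEq] at heq
    exact absurd heq.2 (fun h => h2 _ heq.1 h)
  · rename_i heq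
    simp only [List.cons.injEq] at heq
    obtain ⟨h3, h4⟩ := heq
    subst h4
    rcases h3 with rfl
    rfl

-- A leading '}' at depth 0 is emitted verbatim by B's walk.
theorem tokB_rbrace (rest : List Char) :
    pvGoB 0 (pvTokens ('}' :: rest)).1 (pvTokens ('}' :: rest)).2
      = '}' :: pvGoB 0 (pvTokens rest).1 (pvTokens rest).2 := by
  induction rest with
  | nil => simp [pvTokens, pvGoB]
  | cons c r ih =>
    by_cases hc : c = '}'
    · subst hc
      rw [pvTokens, ih]
      simp [pvGoB]
    · rw [pvTokens_cons '}' (c :: r)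
        (by rintro r' h _; exact absurd h (by decide))
        (by rintro r' _ h; injection h with h' _; exact hc h')]
      cases (pvTokens (c :: r)).1 with
      | nil => simp [pvGoB]
      | cons p ts => cases p with | mk seg b => simp [pvGoB]

theorem pvGoA_eq_pvGoB (depth : Nat) (cs : List Char) :
    pvGoA depth cs = pvGoB depth (pvTokens cs).1 (pvTokens cs).2 := by
  induction depth, cs using pvGoA.induct with
  | case1 depth => simp [pvGoA, pvTokens, pvGoB]
  | case2 depth rest ih =>
    rw [pvGoA, pvTokens]
    simp [pvGoB, ih]
  | case3 depth rest hd ih =>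
    rw [pvGoA, pvTokens]
    simp [pvGoB, ih, hd, Nat.pos_iff_ne_zero.mp hd]
  | case4 depth rest hd ih =>
    have hz : depth = 0 := by omega
    subst hz
    rw [pvGoA, pvTokens]
    simp only [gt_iff_lt, lt_irrefl, if_false]
    rw [ih, tokB_rbrace]
    simp [pvGoB]
  | case5 depth c rest h1 h2 ih =>
    rw [pvGoA, pvTokens_cons c rest (fun r hc hr => h1 r hc hr) (fun r hc hr => h2 r hc hr), ih]
    cases (pvTokens rest).1 with
    | nil => by_cases hz : depth = 0 <;> simp [pvGoB, hz]
    | cons p ts =>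
      cases p with | mk seg b =>
      by_cases hz : depth = 0 <;> simp [pvGoB, hz]
    case x => exact h1
    case x_1 => exact h2

-- ===== VERDICT (by name: the statement is the Claim_ definition above) =====
theorem strip_templates_py_spec : Claim_equal_strip_templates_py := by
  intro text _
  unfold Spec_strip_templates_py strip_templates_py strip_templates_py_alt
  rw [pvGoA_eq_pvGoB]
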